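-- pv_equiv track=rewrite | github.com/cheol-95/Algorithm | Python/098. 방금 그 곡/music.py | solution
-- ===== SOURCE A (Python) =====
-- def solution(m, musicinfos):
--     candidate = []
--     m = m.replace('C#','H').replace('D#','I').replace('F#','J').replace('G#','K').replace('A#','L')
--     for i in musicinfos:
--         tmp = i.split(',')
--         length = (int(tmp[1][:2])*60+int(tmp[1][3:]) - (int(tmp[0][:2])*60+int(tmp[0][3:])))
--         tmp[3] = tmp[3].replace('C#','H').replace('D#','I').replace('F#','J').replace('G#','K').replace('A#','L')
--         music = (tmp[3]*(length))[:length]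
--         if m in music:
--             candidate.append([tmp[2],length])
--     if len(candidate) == 0:
--         return '(None)'
--     return sorted(candidate,key=lambda x:x[1],reverse=True)[0][0]
-- ===== SOURCE B (Python) =====
-- PAIRS = (('C#', 'H'), ('D#', 'I'), ('F#', 'J'), ('G#', 'K'), ('A#', 'L'))
--
-- def _canon(s):
--     for old, new in PAIRS:
--         s = s.replace(old, new)
--     return s
--
-- def _to_sec(t):
--     return int(t[:2]) * 60 + int(t[3:])
--
-- def solution(m, musicinfos):
--     target = _canon(m)
--
--     def entry(info):
--         t = info.split(',')
--         length = _to_sec(t[1]) - _to_sec(t[0])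
--         melody = (_canon(t[3]) * length)[:length]
--         return (t[2], length) if target in melody else None
--
--     def best(infos):
--         if not infos:
--             return None
--         head = entry(infos[0])
--         rest = best(infos[1:])
--         if head is not None and (rest is None or head[1] >= rest[1]):
--             return head
--         return rest
--
--     b = best(musicinfos)
--     return '(None)' if b is None else b[0]
-- ===== Notes on version B (the rewrite author's own statement) =====
-- stated objective: alternative
-- what changed: B replaces A's accumulate-candidates-then-stable-reverse-sort by a recursive decomposition: a per-entry matcher returning an optional (name, length) and a recursion over the list that combines head and best-of-rest with '>=' so the earliest longest match wins, with no candidate list and no sort.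
import Mathlib
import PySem

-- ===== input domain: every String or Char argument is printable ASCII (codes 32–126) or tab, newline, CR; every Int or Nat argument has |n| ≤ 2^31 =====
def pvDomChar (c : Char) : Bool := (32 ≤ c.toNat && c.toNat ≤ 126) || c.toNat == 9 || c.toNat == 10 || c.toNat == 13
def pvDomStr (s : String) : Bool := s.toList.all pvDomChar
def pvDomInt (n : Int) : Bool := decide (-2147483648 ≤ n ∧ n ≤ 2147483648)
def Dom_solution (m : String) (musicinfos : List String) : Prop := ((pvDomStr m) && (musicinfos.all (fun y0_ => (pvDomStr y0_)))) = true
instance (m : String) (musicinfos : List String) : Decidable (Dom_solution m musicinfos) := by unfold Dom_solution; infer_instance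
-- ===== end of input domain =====

-- B replaces A's candidate-list-plus-stable-reverse-sort by a recursive decomposition (per-entry
-- matcher + recursion combining head with best-of-rest via '>='); objective: alternative.

-- ===== PORT A =====
-- the chain of .replace calls applied to m and to tmp[3]
def pvReplA (s : String) : String :=
  PySem.Str.replace (PySem.Str.replace (PySem.Str.replace (PySem.Str.replace
    (PySem.Str.replace s "C#" "H") "D#" "I") "F#" "J") "G#" "K") "A#" "L"

-- one iteration of A's for-loop; `none` = the Python raised (excluded by Pre_solution)
def pvStepA (m' : String) (acc : Option (List (String × Int))) (i : String) :
    Option (List (String × Int)) :=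
  match acc with
  | none => none
  | some cand =>
    match PySem.Str.split? i "," with
    | none => none
    | some tmp =>
      match PySem.List.pyGet? tmp 0, PySem.List.pyGet? tmp 1,
            PySem.List.pyGet? tmp 2, PySem.List.pyGet? tmp 3 with
      | some t0, some t1, some t2, some t3 =>
        match PySem.Int.ofStr? (PySem.Str.slice t1 none (some 2)),
              PySem.Int.ofStr? (PySem.Str.slice t1 (some 3) none),
              PySem.Int.ofStr? (PySem.Str.slice t0 none (some 2)),
              PySem.Int.ofStr? (PySem.Str.slice t0 (some 3) none) with
        | some e1, some e2, some s1, some s2 =>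
          let length := e1 * 60 + e2 - (s1 * 60 + s2)
          let music := PySem.List.slice (PySem.List.pyRepeat (pvReplA t3).toList length)
            none (some length)
          if PySem.Chars.isIn m'.toList music then some (cand ++ [(t2, length)]) else some cand
        | _, _, _, _ => none
      | _, _, _, _ => none

def solution (m : String) (musicinfos : List String) : String :=
  match musicinfos.foldl (pvStepA (pvReplA m)) (some []) with
  | none => "(None)"          -- unreachable under Pre_solution (the Python raises there)
  | some cand =>
    if cand.length = 0 then "(None)"
    else
      match PySem.List.sorted cand (fun x => x.2) true with
      | [] => "(None)"        -- unreachable: cand ≠ []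
      | x :: _ => x.1

-- ===== PORT B =====
-- Source B's _canon helper: a loop over the replacement pairs
def pvCanon (s : String) : String :=
  [("C#", "H"), ("D#", "I"), ("F#", "J"), ("G#", "K"), ("A#", "L")].foldl
    (fun acc p => PySem.Str.replace acc p.1 p.2) s

-- Source B's _to_sec helper; none = int() raised ValueError
def pvToSec (t : String) : Option Int :=
  match PySem.Int.ofStr? (PySem.Str.slice t none (some 2)),
        PySem.Int.ofStr? (PySem.Str.slice t (some 3) none) with
  | some a, some b => some (a * 60 + b)
  | _, _ => none

-- Source B's entry: optional matched (name, length); outer none = the Python raised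
def pvEntry (target info : String) : Option (Option (String × Int)) :=
  match PySem.Str.split? info "," with
  | none => none
  | some t =>
    match PySem.List.pyGet? t 0, PySem.List.pyGet? t 1,
          PySem.List.pyGet? t 2, PySem.List.pyGet? t 3 with
    | some t0, some t1, some t2, some t3 =>
      match pvToSec t1, pvToSec t0 with
      | some e, some s =>
        let length := e - s
        let melody := PySem.List.slice (PySem.List.pyRepeat (pvCanon t3).toList length)
          none (some length)
        some (if PySem.Chars.isIn target.toList melody then some (t2, length) else none)
      | _, _ => none
    | _, _, _, _ => none

-- Source B's best: recursion on the list, head wins ties over best-of-rest via '>='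
def pvBestRec (target : String) : List String → Option (Option (String × Int))
  | [] => some none
  | i :: rest =>
    match pvEntry target i with
    | none => none
    | some head =>
      match pvBestRec target rest with
      | none => none
      | some r =>
        some (match head, r with
          | some h, none => some h
          | some h, some q => if h.2 ≥ q.2 then some h else some q
          | none, r' => r')

def solution_alt (m : String) (musicinfos : List String) : String :=
  match pvBestRec (pvCanon m) musicinfos with
  | some (some b) => b.1
  | _ => "(None)"             -- some none = no match; outer none = the Python raises (outside Pre_)

-- ===== PRECONDITION & SPEC =====
-- Pre_ excludes exactly the inputs on which A raises: an entry with fewer than 4 comma fields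
-- (IndexError) or whose time fields do not parse as int(.[:2]) / int(.[3:]) (ValueError).
def pvParses (i : String) : Bool :=
  match PySem.Str.split? i "," with
  | some (t0 :: t1 :: _ :: _ :: _) =>
      (PySem.Int.ofStr? (PySem.Str.slice t1 none (some 2))).isSome &&
      (PySem.Int.ofStr? (PySem.Str.slice t1 (some 3) none)).isSome &&
      (PySem.Int.ofStr? (PySem.Str.slice t0 none (some 2))).isSome &&
      (PySem.Int.ofStr? (PySem.Str.slice t0 (some 3) none)).isSome
  | _ => false

def Pre_solution (m : String) (musicinfos : List String) : Prop :=
  musicinfos.all pvParses = true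

instance (m : String) (musicinfos : List String) : Decidable (Pre_solution m musicinfos) := by
  unfold Pre_solution; infer_instance

def pvWitness_solution : String × List String :=
  ("ABC", ["12:00,12:14,HELLO,C#ABC", "13:00,13:05,WORLD,ABCDEF"])

def Spec_solution (m : String) (musicinfos : List String) (out : String) : Prop := out = solution_alt m musicinfos
instance (m : String) (musicinfos : List String) (out : String) : Decidable (Spec_solution m musicinfos out) := by unfold Spec_solution; infer_instance

-- ===== CLAIM (what is proved, stated in full; the proofs are below) =====
def Claim_equal_solution : Prop := ∀ (m : String) (musicinfos : List String), Dom_solution m musicinfos → Pre_solution m musicinfos → Spec_solution m musicinfos (solution m musicinfos)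

-- ===== LEMMAS AND PROOFS =====

theorem pvCanon_eq_replA (s : String) : pvCanon s = pvReplA s := rfl

-- the candidate list A accumulates, rebuilt from B's per-entry matcher
def pvCandList (m' : String) : List String → List (String × Int)
  | [] => []
  | i :: t => ((pvEntry m' i).join).toList ++ pvCandList m' t

-- B's combine, as a function over the candidate list (earliest-max, head wins ties)
def pvSelR : List (String × Int) → Option (String × Int)
  | [] => none
  | p :: t =>
    match pvSelR t with
    | none => some p
    | some q => if p.2 ≥ q.2 then some p else some q

-- the left-fold earliest-max used to read off the head of A's stable reverse sort
def pvBestF (b : Option (String × Int)) (p : String × Int) : Option (String × Int) :=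
  match b with
  | none => some p
  | some q => if q.2 < p.2 then some p else some q

-- one parsing-safe entry: B's matcher returns, and A's step appends exactly its matches
theorem pvStep_eq (m' i : String) (cand : List (String × Int))
    (h : pvParses i = true) :
    ∃ e, pvEntry m' i = some e ∧
      pvStepA m' (some cand) i = some (cand ++ e.toList) := by
  unfold pvParses at h
  cases hsp : PySem.Str.split? i "," with
  | none => rw [hsp] at h; simp at h
  | some tmp =>
    rw [hsp] at h
    rcases tmp with _ | ⟨t0, _ | ⟨t1, _ | ⟨t2, _ | ⟨t3, rest⟩⟩⟩⟩ <;> try simp at h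
    case cons.cons.cons.cons =>
      simp only [Option.isSome_iff_exists] at h
      obtain ⟨⟨⟨⟨e1, he1⟩, e2, he2⟩, s1, hs1⟩, s2, hs2⟩ := h
      have g0 : PySem.List.pyGet? (t0 :: t1 :: t2 :: t3 :: rest) 0 = some t0 :=
        PySem.List.pyGet?_ofNat _ 0 (by simp)
      have g1 : PySem.List.pyGet? (t0 :: t1 :: t2 :: t3 :: rest) 1 = some t1 :=
        PySem.List.pyGet?_ofNat _ 1 (by simp)
      have g2 : PySem.List.pyGet? (t0 :: t1 :: t2 :: t3 :: rest) 2 = some t2 :=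
        PySem.List.pyGet?_ofNat _ 2 (by simp)
      have g3 : PySem.List.pyGet? (t0 :: t1 :: t2 :: t3 :: rest) 3 = some t3 :=
        PySem.List.pyGet?_ofNat _ 3 (by simp)
      have hts1 : pvToSec t1 = some (e1 * 60 + e2) := by
        unfold pvToSec; rw [he1, he2]
      have hts0 : pvToSec t0 = some (s1 * 60 + s2) := by
        unfold pvToSec; rw [hs1, hs2]
      set len := e1 * 60 + e2 - (s1 * 60 + s2) with hlen
      have hE : pvEntry m' i =
          some (if PySem.Chars.isIn m'.toList (PySem.List.slice
              (PySem.List.pyRepeat (pvCanon t3).toList len) none (some len)) = true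
            then some (t2, len) else none) := by
        rw [pvEntry, hsp]
        simp only [g0, g1, g2, g3, hts1, hts0]
        rfl
      have hA : pvStepA m' (some cand) i =
          (if PySem.Chars.isIn m'.toList (PySem.List.slice
              (PySem.List.pyRepeat (pvReplA t3).toList len) none (some len)) = true
            then some (cand ++ [(t2, len)]) else some cand) := by
        rw [pvStepA, hsp]
        simp only [g0, g1, g2, g3, he1, he2, hs1, hs2]
        rfl
      rw [hE, hA, pvCanon_eq_replA]
      cases hin : PySem.Chars.isIn m'.toList (PySem.List.slice
          (PySem.List.pyRepeat (pvReplA t3).toList len) none (some len)) with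
      | false => exact ⟨none, by simp, by simp⟩
      | true => exact ⟨some (t2, len), by simp, by simp⟩

-- A's loop over a parsing-safe list returns the accumulated candidate list
theorem pvLoopA_eq (m' : String) (l : List String) (hl : l.all pvParses = true)
    (cand : List (String × Int)) :
    l.foldl (pvStepA m') (some cand) = some (cand ++ pvCandList m' l) := by
  induction l generalizing cand with
  | nil => simp [pvCandList]
  | cons i t ih =>
    simp only [List.all_cons, Bool.and_eq_true] at hl
    obtain ⟨e, hE, hA⟩ := pvStep_eq m' i cand hl.1
    simp only [List.foldl_cons, hA, ih hl.2, pvCandList, hE, List.append_assoc]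
    cases e <;> simp [Option.join]

-- B's recursion over a parsing-safe list returns pvSelR of the candidate list
theorem pvLoopB_eq (m' : String) (l : List String) (hl : l.all pvParses = true) :
    pvBestRec m' l = some (pvSelR (pvCandList m' l)) := by
  induction l with
  | nil => rfl
  | cons i t ih =>
    simp only [List.all_cons, Bool.and_eq_true] at hl
    obtain ⟨e, hE, -⟩ := pvStep_eq m' i [] hl.1
    rw [pvBestRec, hE, ih hl.2]
    cases e with
    | none => simp [pvCandList, hE, Option.join]
    | some p =>
      simp only [pvCandList, hE]
      cases hq : pvSelR (pvCandList m' t) <;> simp [pvSelR, hq, Option.join]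

-- combining the left fold with a seeded start
def pvComb (q : String × Int) (r : Option (String × Int)) : Option (String × Int) :=
  match r with
  | none => some q
  | some r' => if q.2 ≥ r'.2 then some q else some r'

theorem pvFoldF_some (t : List (String × Int)) (q : String × Int) :
    t.foldl pvBestF (some q) = pvComb q (t.foldl pvBestF none) := by
  induction t generalizing q with
  | nil => rfl
  | cons x t ih =>
    simp only [List.foldl_cons]
    rw [show pvBestF none x = some x from rfl]
    by_cases h1 : q.2 < x.2
    · rw [show pvBestF (some q) x = some x by simp [pvBestF, h1], ih x]
      cases hr : t.foldl pvBestF none with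
      | none =>
        simp only [pvComb]
        rw [if_neg (by omega)]
      | some r =>
        by_cases h2 : x.2 ≥ r.2
        · simp only [pvComb]
          rw [if_pos h2]
          simp only [pvComb]
          rw [if_neg (by omega)]
        · simp only [pvComb]
          rw [if_neg h2]
          simp only [pvComb]
          rw [if_neg (by omega)]
    · rw [show pvBestF (some q) x = some q by simp [pvBestF, h1], ih q, ih x]
      cases hr : t.foldl pvBestF none with
      | none =>
        simp only [pvComb]
        rw [if_pos (by omega)]
      | some r =>
        by_cases h2 : x.2 ≥ r.2
        · simp only [pvComb]
          rw [if_pos h2]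
          simp only [pvComb]
          rw [if_pos (by omega), if_pos (by omega)]
        · simp [pvComb, h2]

-- the recursive selection equals the left-fold selection
theorem pvSelR_eq_foldl (c : List (String × Int)) :
    pvSelR c = c.foldl pvBestF none := by
  induction c with
  | nil => rfl
  | cons p t ih =>
    show pvComb p (pvSelR t) = _
    rw [List.foldl_cons, show pvBestF none p = some p from rfl, pvFoldF_some, ih]

-- head of insertBy (reverse-sort order) only looks at the old head
theorem pvHead_insertBy {α : Type} (before : α → α → Bool) (x : α) (ys : List α) :
    (PySem.List.insertBy before x ys).head? =
      some (match ys with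
        | [] => x
        | y :: _ => if before x y then x else y) := by
  cases ys with
  | nil => simp [PySem.List.insertBy]
  | cons y t =>
    cases h : before x y
    · simp [PySem.List.insertBy, h]
    · simp [PySem.List.insertBy, h]

-- the head of the insertion-sort fold is the left-fold earliest-max
theorem pvSortFold_head (l : List (String × Int)) (acc : List (String × Int))
    (b : Option (String × Int)) (hab : acc.head? = b) :
    (l.foldl (fun acc x =>
        PySem.List.insertBy (fun a b => decide ((fun x : String × Int => x.2) b <
          (fun x : String × Int => x.2) a)) x acc) acc).head? =
      l.foldl pvBestF b := by
  induction l generalizing acc b with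
  | nil => exact hab
  | cons x t ih =>
    refine ih _ _ ?_
    rw [pvHead_insertBy]
    cases b with
    | none =>
      have hacc : acc = [] := by cases acc <;> simp_all
      subst hacc
      simp [pvBestF]
    | some q =>
      cases acc with
      | nil => simp at hab
      | cons y ys =>
        simp only [List.head?_cons, Option.some.injEq] at hab
        subst hab
        by_cases h : y.2 < x.2
        · simp [pvBestF, h]
        · simp [pvBestF, h]

theorem pvSorted_head (cand : List (String × Int)) :
    (PySem.List.sorted cand (fun x => x.2) true).head? = cand.foldl pvBestF none := by
  rw [PySem.List.sorted_rev_eq_foldl_insertBy]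
  exact pvSortFold_head cand [] none rfl

-- pvSelR of a nonempty list is never none
theorem pvSelR_cons_ne_none (p : String × Int) (t : List (String × Int)) :
    pvSelR (p :: t) ≠ none := by
  show pvComb p (pvSelR t) ≠ none
  cases pvSelR t with
  | none => simp [pvComb]
  | some q => simp only [pvComb]; split_ifs <;> simp

-- ===== VERDICT (by name: the statement is the Claim_ definition above) =====
theorem solution_spec : Claim_equal_solution := by
  intro m musicinfos _ hpre
  unfold Spec_solution solution solution_alt
  rw [pvCanon_eq_replA, pvLoopA_eq (pvReplA m) musicinfos hpre [],
      pvLoopB_eq (pvReplA m) musicinfos hpre, List.nil_append]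
  generalize pvCandList (pvReplA m) musicinfos = c
  have hh : (PySem.List.sorted c (fun x => x.2) true).head? = pvSelR c := by
    rw [pvSorted_head, pvSelR_eq_foldl]
  cases hb : pvSelR c with
  | none =>
    have hcnil : c = [] := by
      cases c with
      | nil => rfl
      | cons p t => exact absurd hb (pvSelR_cons_ne_none p t)
    subst hcnil
    rfl
  | some b =>
    rw [hb] at hh
    have hne : c ≠ [] := by
      intro h
      subst h
      simp [pvSelR] at hb
    cases hs : PySem.List.sorted c (fun x => x.2) true with
    | nil => rw [hs] at hh; simp at hh
    | cons x t =>
      rw [hs] at hh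
      simp only [List.head?_cons, Option.some.injEq] at hh
      subst hh
      simp [List.length_eq_zero_iff, hne, hs]
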